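-- pv_equiv track=rewrite | github.com/valx-vex/valxb-site | scripts/generate-scp.py | build_sidebar
-- ===== SOURCE A (Python) =====
-- def build_sidebar(entries, current_slug=""):
--     series_map = {
--         "core": "Core Archive",
--         "ark": "ARK Series",
--         "flk": "FLK Series",
--         "roar": "ROAR Series",
--         "vex": "VEX Series",
--         "warp": "WARP Series",
--         "special": "Special Documents",
--     }
--     html = '<nav class="scp-sidebar" id="scpSidebar">\n'
--     html += '<div class="scp-sidebar__header">VALX SCP<br>ARCHIVE</div>\n'
--     html += f'<a class="scp-sidebar__link scp-sidebar__link--index" href="/pages/scp">◇ Index</a>\n'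
--
--     for series_key in ["core", "ark", "flk", "roar", "vex", "warp", "special"]:
--         group = [e for e in entries if e["series"] == series_key]
--         if not group:
--             continue
--         label = series_map.get(series_key, series_key)
--         html += f'<details class="scp-sidebar__group">\n'
--         html += f'<summary class="scp-sidebar__category">{label} ({len(group)})</summary>\n'
--         for e in sorted(group, key=lambda x: x["file_id"]):
--             active = " scp-sidebar__link--active" if e["slug"] == current_slug else ""
--             short_title = e["title"][:35] + ("..." if len(e["title"]) > 35 else "")
--             html += f'<a class="scp-sidebar__link{active}" href="/pages/scp/{e["slug"]}">{short_title}</a>\n'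
--         html += '</details>\n'
--
--     html += '</nav>\n'
--     return html
-- ===== SOURCE B (Python) =====
-- def build_sidebar(entries, current_slug=""):
--     series_map = {
--         "core": "Core Archive",
--         "ark": "ARK Series",
--         "flk": "FLK Series",
--         "roar": "ROAR Series",
--         "vex": "VEX Series",
--         "warp": "WARP Series",
--         "special": "Special Documents",
--     }
--     keys = ["core", "ark", "flk", "roar", "vex", "warp", "special"]
--
--     # Radix approach: keep only known-series entries, stable-sort the whole list
--     # by file_id and then by series rank (two stable passes = lexicographic order),
--     # then emit groups in ONE linear scan over run boundaries.
--     kept = [e for e in entries if e["series"] in keys]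
--     kept.sort(key=lambda e: e["file_id"])
--     kept.sort(key=lambda e: keys.index(e["series"]))
--
--     html = '<nav class="scp-sidebar" id="scpSidebar">\n'
--     html += '<div class="scp-sidebar__header">VALX SCP<br>ARCHIVE</div>\n'
--     html += f'<a class="scp-sidebar__link scp-sidebar__link--index" href="/pages/scp">◇ Index</a>\n'
--
--     i = 0
--     n = len(kept)
--     while i < n:
--         series = kept[i]["series"]
--         j = i
--         while j < n and kept[j]["series"] == series:
--             j += 1
--         label = series_map.get(series, series)
--         html += '<details class="scp-sidebar__group">\n'
--         html += f'<summary class="scp-sidebar__category">{label} ({j - i})</summary>\n'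
--         for e in kept[i:j]:
--             active = " scp-sidebar__link--active" if e["slug"] == current_slug else ""
--             short_title = e["title"][:35] + ("..." if len(e["title"]) > 35 else "")
--             html += f'<a class="scp-sidebar__link{active}" href="/pages/scp/{e["slug"]}">{short_title}</a>\n'
--         html += '</details>\n'
--         i = j
--
--     html += '</nav>\n'
--     return html
-- ===== Notes on version B (the rewrite author's own statement) =====
-- stated objective: alternative
-- what changed: Replaces A's seven per-series filter-then-sort scans by a radix-style double stable sort of the whole entry list (by file_id, then by series rank) followed by a single linear run-boundary scan that emits each group's HTML block.
import Mathlib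
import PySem

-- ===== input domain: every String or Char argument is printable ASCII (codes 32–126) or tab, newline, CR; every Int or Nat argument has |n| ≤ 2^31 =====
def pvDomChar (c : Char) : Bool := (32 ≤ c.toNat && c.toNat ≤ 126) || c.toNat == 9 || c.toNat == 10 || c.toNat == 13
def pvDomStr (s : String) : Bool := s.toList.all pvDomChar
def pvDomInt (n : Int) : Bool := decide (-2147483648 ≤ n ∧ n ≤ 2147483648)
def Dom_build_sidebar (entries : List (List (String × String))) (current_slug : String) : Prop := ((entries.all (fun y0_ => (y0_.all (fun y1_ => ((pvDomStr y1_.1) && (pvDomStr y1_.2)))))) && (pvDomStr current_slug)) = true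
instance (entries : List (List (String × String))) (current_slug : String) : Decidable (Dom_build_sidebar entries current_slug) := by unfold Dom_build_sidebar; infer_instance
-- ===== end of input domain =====

-- B replaces A's seven filter-then-sort scans by a radix-style double stable sort of the
-- whole entry list (by file_id, then by series rank) followed by ONE linear run-boundary
-- scan that emits the groups (objective: alternative algorithm, same output).

-- ===== PORT A =====
-- e[k] on an entry dict (assoc list, first match); total form — Pre_ guarantees the key is present
def pvVal (e : List (String × String)) (k : String) : String := (List.lookup k e).getD ""

def pvSeriesMap : PySem.Dict String String := PySem.Dict.ofList
  [("core", "Core Archive"), ("ark", "ARK Series"), ("flk", "FLK Series"),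
   ("roar", "ROAR Series"), ("vex", "VEX Series"), ("warp", "WARP Series"),
   ("special", "Special Documents")]

def build_sidebar (entries : List (List (String × String))) (current_slug : String) : String :=
  let series_map := pvSeriesMap
  let html := "<nav class=\"scp-sidebar\" id=\"scpSidebar\">\n"
  let html := html ++ "<div class=\"scp-sidebar__header\">VALX SCP<br>ARCHIVE</div>\n"
  let html := html ++ "<a class=\"scp-sidebar__link scp-sidebar__link--index\" href=\"/pages/scp\">◇ Index</a>\n"
  let html := ["core", "ark", "flk", "roar", "vex", "warp", "special"].foldl (fun html series_key =>
    let group := entries.filter (fun e => pvVal e "series" == series_key)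
    if group.isEmpty then html
    else
      let label := series_map.getD series_key series_key
      let html := html ++ "<details class=\"scp-sidebar__group\">\n"
      let html := html ++ "<summary class=\"scp-sidebar__category\">" ++ label ++ " (" ++ PySem.Int.toStr (group.length : Int) ++ ")</summary>\n"
      let html := (PySem.List.sorted group (fun x => pvVal x "file_id") false).foldl (fun html e =>
        let active := if pvVal e "slug" = current_slug then " scp-sidebar__link--active" else ""
        let short_title := PySem.Str.slice (pvVal e "title") none (some 35) ++ (if PySem.Str.len (pvVal e "title") > 35 then "..." else "")
        html ++ ("<a class=\"scp-sidebar__link" ++ active ++ "\" href=\"/pages/scp/" ++ pvVal e "slug" ++ "\">" ++ short_title ++ "</a>\n")) html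
      html ++ "</details>\n") html
  html ++ "</nav>\n"

-- ===== PORT B =====
def pvKeys : List String := ["core", "ark", "flk", "roar", "vex", "warp", "special"]

-- keys.index(e["series"]) — total form; only applied to entries whose series is in pvKeys
def pvRank (s : String) : Nat := (PySem.List.index? pvKeys s).getD 0

-- the while-loop of Source B: one linear scan over the sorted list, emitting a <details>
-- block per maximal run of equal series (run = kept[i:j], j - i = run.length)
def pvEmitRuns (current_slug : String) (kept : List (List (String × String))) (html : String) : String :=
  match kept with
  | [] => html
  | e :: rest =>
    let series := pvVal e "series"
    let run := e :: rest.takeWhile (fun x => pvVal x "series" == series)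
    let html := html ++ "<details class=\"scp-sidebar__group\">\n"
    let html := html ++ "<summary class=\"scp-sidebar__category\">" ++ pvSeriesMap.getD series series ++ " (" ++ PySem.Int.toStr (run.length : Int) ++ ")</summary>\n"
    let html := run.foldl (fun html e =>
      let active := if pvVal e "slug" = current_slug then " scp-sidebar__link--active" else ""
      let short_title := PySem.Str.slice (pvVal e "title") none (some 35) ++ (if PySem.Str.len (pvVal e "title") > 35 then "..." else "")
      html ++ ("<a class=\"scp-sidebar__link" ++ active ++ "\" href=\"/pages/scp/" ++ pvVal e "slug" ++ "\">" ++ short_title ++ "</a>\n")) html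
    pvEmitRuns current_slug (rest.dropWhile (fun x => pvVal x "series" == series)) (html ++ "</details>\n")
termination_by kept.length
decreasing_by simp; exact List.length_dropWhile_le _ _

def build_sidebar_alt (entries : List (List (String × String))) (current_slug : String) : String :=
  let kept := entries.filter (fun e => pvKeys.contains (pvVal e "series"))
  let kept := PySem.List.sorted kept (fun e => pvVal e "file_id") false
  let kept := PySem.List.sorted kept (fun e => pvRank (pvVal e "series")) false
  let html := "<nav class=\"scp-sidebar\" id=\"scpSidebar\">\n"
  let html := html ++ "<div class=\"scp-sidebar__header\">VALX SCP<br>ARCHIVE</div>\n"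
  let html := html ++ "<a class=\"scp-sidebar__link scp-sidebar__link--index\" href=\"/pages/scp\">◇ Index</a>\n"
  pvEmitRuns current_slug kept html ++ "</nav>\n"

-- ===== PRECONDITION & SPEC =====
-- Pre_ excludes exactly the inputs where Python A raises KeyError: an entry without a
-- "series" key, or an entry in one of the seven listed series that lacks "file_id",
-- "slug" or "title".
def Pre_build_sidebar (entries : List (List (String × String))) (current_slug : String) : Prop :=
  ∀ e ∈ entries, (List.lookup "series" e).isSome = true ∧
    (((List.lookup "series" e).getD "") ∈ ["core", "ark", "flk", "roar", "vex", "warp", "special"] →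
      (List.lookup "file_id" e).isSome = true ∧ (List.lookup "slug" e).isSome = true ∧
      (List.lookup "title" e).isSome = true)
instance (entries : List (List (String × String))) (current_slug : String) : Decidable (Pre_build_sidebar entries current_slug) := by unfold Pre_build_sidebar; infer_instance

def pvWitness_build_sidebar : (List (List (String × String))) × String :=
  ([[("series", "core"), ("file_id", "scp-001"), ("slug", "scp-001"), ("title", "The First One")],
    [("series", "vex"), ("file_id", "vex-2"), ("slug", "vex-2"), ("title", "Second")]], "scp-001")

def Spec_build_sidebar (entries : List (List (String × String))) (current_slug : String) (out : String) : Prop := out = build_sidebar_alt entries current_slug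
instance (entries : List (List (String × String))) (current_slug : String) (out : String) : Decidable (Spec_build_sidebar entries current_slug out) := by unfold Spec_build_sidebar; infer_instance

-- ===== CLAIM (what is proved, stated in full; the proofs are below) =====
def Claim_equal_build_sidebar : Prop := ∀ (entries : List (List (String × String))) (current_slug : String), Dom_build_sidebar entries current_slug → Pre_build_sidebar entries current_slug → Spec_build_sidebar entries current_slug (build_sidebar entries current_slug)

-- ===== LEMMAS AND PROOFS =====

-- one emitted link line (definitionally the body of both ports' inner loops)
def pvLink (current_slug : String) (e : List (String × String)) : String :=
  let active := if pvVal e "slug" = current_slug then " scp-sidebar__link--active" else ""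
  let short_title := PySem.Str.slice (pvVal e "title") none (some 35) ++ (if PySem.Str.len (pvVal e "title") > 35 then "..." else "")
  "<a class=\"scp-sidebar__link" ++ active ++ "\" href=\"/pages/scp/" ++ pvVal e "slug" ++ "\">" ++ short_title ++ "</a>\n"

-- one <details> block for series k with (already sorted) group g
def pvBlock (current_slug : String) (k : String) (g : List (List (String × String))) : String :=
  (g.foldl (fun h e => h ++ pvLink current_slug e)
    ("<details class=\"scp-sidebar__group\">\n" ++
     ("<summary class=\"scp-sidebar__category\">" ++ pvSeriesMap.getD k k ++ " (" ++ PySem.Int.toStr (g.length : Int) ++ ")</summary>\n")))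
  ++ "</details>\n"

-- strings: foldl over ++ distributes over a prefix of the accumulator
theorem pv_foldl_append {α : Type} (f : α → String) (l : List α) (x y : String) :
    l.foldl (fun h e => h ++ f e) (x ++ y) = x ++ l.foldl (fun h e => h ++ f e) y := by
  induction l generalizing y with
  | nil => rfl
  | cons a t ih => simp only [List.foldl_cons, String.append_assoc, ih]

theorem pv_insertBy_append_left {α : Type} (bef : α → α → Bool) (x : α) (L1 L2 : List α)
    (h1 : ∀ y ∈ L1, bef x y = false) :
    PySem.List.insertBy bef x (L1 ++ L2) = L1 ++ PySem.List.insertBy bef x L2 := by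
  induction L1 with
  | nil => rfl
  | cons a t ih =>
    simp only [List.cons_append, PySem.List.insertBy, h1 a (by simp), Bool.false_eq_true, if_false]
    simp [ih (fun y hy => h1 y (by simp [hy]))]

theorem pv_insertBy_append {α : Type} (bef : α → α → Bool) (x : α) (L1 L2 : List α)
    (h1 : ∀ y ∈ L1, bef x y = false) (h2 : ∀ y ∈ L2, bef x y = true) :
    PySem.List.insertBy bef x (L1 ++ L2) = L1 ++ x :: L2 := by
  rw [pv_insertBy_append_left bef x L1 L2 h1]
  cases L2 with
  | nil => simp [PySem.List.insertBy_of_forall_not_before]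
  | cons b t => simp [PySem.List.insertBy, h2 b (by simp)]

-- inserting x into the bucket decomposition appends it at the end of its own bucket
theorem pv_insertBy_flatMap {α : Type} (rk : α → Nat) (R : List Nat) (xs : List α) (x : α)
    (hR : R.Pairwise (· < ·)) (hx : rk x ∈ R) :
    PySem.List.insertBy (fun a b => decide (rk a < rk b)) x
      (R.flatMap (fun r => xs.filter (fun e => rk e == r)))
    = R.flatMap (fun r => (xs ++ [x]).filter (fun e => rk e == r)) := by
  induction R with
  | nil => simp at hx
  | cons r R' ih =>
    simp only [List.flatMap_cons]
    by_cases hr : rk x = r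
    · have hnot : ∀ r' ∈ R', rk x ≠ r' := by
        intro r' hr'
        have := (List.pairwise_cons.mp hR).1 r' hr'
        omega
      rw [pv_insertBy_append (L1 := xs.filter (fun e => rk e == r))
            (L2 := R'.flatMap (fun r => xs.filter (fun e => rk e == r)))]
      · have hb : (xs ++ [x]).filter (fun e => rk e == r) = xs.filter (fun e => rk e == r) ++ [x] := by
          simp [List.filter_append, hr]
        rw [hb]
        have hrest : R'.flatMap (fun r => (xs ++ [x]).filter (fun e => rk e == r))
            = R'.flatMap (fun r => xs.filter (fun e => rk e == r)) := by
          apply List.flatMap_congr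
          intro r' hr'
          simp [List.filter_append, hnot r' hr']
        rw [hrest]; simp
      · intro y hy
        simp only [List.mem_filter, beq_iff_eq] at hy
        simp [hy.2, hr]
      · intro y hy
        simp only [List.mem_flatMap, List.mem_filter, beq_iff_eq] at hy
        obtain ⟨r', hr', _, hy2⟩ := hy
        have := (List.pairwise_cons.mp hR).1 r' hr'
        simp [hy2]; omega
    · have hxR' : rk x ∈ R' := by simpa [hr] using hx
      have hrlt : r < rk x := (List.pairwise_cons.mp hR).1 _ hxR'
      rw [pv_insertBy_append_left (L1 := xs.filter (fun e => rk e == r))]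
      · rw [ih (List.pairwise_cons.mp hR).2 hxR']
        have : (xs ++ [x]).filter (fun e => rk e == r) = xs.filter (fun e => rk e == r) := by
          simp [List.filter_append, hr]
        rw [this]
      · intro y hy
        simp only [List.mem_filter, beq_iff_eq] at hy
        simp [hy.2]; omega

-- a stable sort by a Nat rank is counting sort: the buckets in rank order
theorem pv_sorted_buckets {α : Type} (rk : α → Nat) (R : List Nat) (xs : List α)
    (hR : R.Pairwise (· < ·)) (hall : ∀ e ∈ xs, rk e ∈ R) :
    PySem.List.sorted xs rk false = R.flatMap (fun r => xs.filter (fun e => rk e == r)) := by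
  rw [PySem.List.sorted_eq_foldl_insertBy]
  induction xs using List.reverseRecOn with
  | nil => simp
  | append_singleton t x ih =>
    rw [List.foldl_append]
    simp only [List.foldl_cons, List.foldl_nil]
    rw [ih (fun e he => hall e (by simp [he]))]
    exact pv_insertBy_flatMap rk R t x hR (hall x (by simp))

theorem pv_filter_insertBy {α : Type} (key : α → String) (p : α → Bool) (x : α) (ys : List α)
    (hys : ys.Pairwise (fun a b => key a ≤ key b)) :
    (PySem.List.insertBy (fun a b => decide (key a < key b)) x ys).filter p
    = if p x then PySem.List.insertBy (fun a b => decide (key a < key b)) x (ys.filter p)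
      else ys.filter p := by
  induction ys with
  | nil => cases hpx : p x <;> simp [PySem.List.insertBy, hpx]
  | cons y t ih =>
    have hyt := (List.pairwise_cons.mp hys).1
    by_cases hb : key x < key y
    · have hfront : ∀ (L : List α), (∀ z ∈ L, key y ≤ key z ∨ z = y) →
          PySem.List.insertBy (fun a b => decide (key a < key b)) x L = x :: L := by
        intro L hL
        cases L with
        | nil => rfl
        | cons z zs =>
          have : key x < key z := by
            rcases hL z (by simp) with h | h
            · exact lt_of_lt_of_le hb h
            · simpa [h] using hb
          simp [PySem.List.insertBy, this]
      simp only [PySem.List.insertBy, hb, decide_true, if_true]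
      cases hpx : p x
      · simp [List.filter, hpx]
      · have h := hfront ((y :: t).filter p) (by
          intro z hz
          simp only [List.mem_filter, List.mem_cons] at hz
          rcases hz.1 with h | h
          · right; exact h
          · left; exact hyt z h)
        simp only [List.filter_cons, hpx, if_true] at h ⊢
        rw [h]
    · simp only [PySem.List.insertBy, hb, decide_false, Bool.false_eq_true, if_false]
      have iht := ih (List.pairwise_cons.mp hys).2
      cases hpy : p y <;> cases hpx : p x <;>
        simp_all [PySem.List.insertBy]

-- filtering commutes with a stable sort
theorem pv_filter_sorted {α : Type} (key : α → String) (p : α → Bool) (xs : List α) :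
    (PySem.List.sorted xs key false).filter p = PySem.List.sorted (xs.filter p) key false := by
  induction xs using List.reverseRecOn with
  | nil => simp [PySem.List.sorted]
  | append_singleton t x ih =>
    rw [PySem.List.sorted_eq_foldl_insertBy, List.foldl_append]
    simp only [List.foldl_cons, List.foldl_nil]
    rw [← PySem.List.sorted_eq_foldl_insertBy]
    rw [pv_filter_insertBy key p x _ (PySem.List.sorted_pairwise t key)]
    rw [List.filter_append]
    cases hpx : p x
    · simp only [List.filter_cons, hpx, Bool.false_eq_true, if_false, List.filter_nil,
        List.append_nil, ih]
    · simp only [List.filter_cons, hpx, if_true, List.filter_nil]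
      rw [PySem.List.sorted_eq_foldl_insertBy (t.filter p ++ [x]), List.foldl_append]
      simp only [List.foldl_cons, List.foldl_nil]
      rw [← PySem.List.sorted_eq_foldl_insertBy, ih]

theorem pv_take_drop_while {α : Type} (p : α → Bool) (g L : List α)
    (h1 : ∀ y ∈ g, p y = true) (h2 : ∀ y ∈ L, p y = false) :
    (g ++ L).takeWhile p = g ∧ (g ++ L).dropWhile p = L := by
  induction g with
  | nil =>
    cases L with
    | nil => simp
    | cons b t => simp [h2 b (by simp)]
  | cons a t ih =>
    have := ih (fun y hy => h1 y (by simp [hy]))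
    simp [h1 a (by simp), this.1, this.2]

-- the run scan over a concatenation of constant-series groups emits one block per nonempty group
theorem pv_runs (cs : String) (K : List String) (grp : String → List (List (String × String)))
    (html : String) (hK : K.Nodup)
    (hg : ∀ k ∈ K, ∀ e ∈ grp k, pvVal e "series" = k) :
    pvEmitRuns cs (K.flatMap grp) html
    = K.foldl (fun h k => if (grp k).isEmpty then h else h ++ pvBlock cs k (grp k)) html := by
  induction K generalizing html with
  | nil => simp [pvEmitRuns]
  | cons k K' ih =>
    have hK' := (List.nodup_cons.mp hK).2
    have hkK' : k ∉ K' := (List.nodup_cons.mp hK).1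
    have hg' : ∀ k' ∈ K', ∀ e ∈ grp k', pvVal e "series" = k' :=
      fun k' hk' => hg k' (by simp [hk'])
    simp only [List.flatMap_cons, List.foldl_cons]
    cases hgk : grp k with
    | nil =>
      simp only [List.nil_append, List.isEmpty_nil, if_true]
      exact ih _ hK' hg'
    | cons e g =>
      have hse : pvVal e "series" = k := hg k (by simp) e (by simp [hgk])
      have hgall : ∀ y ∈ g, (pvVal y "series" == pvVal e "series") = true := by
        intro y hy
        simp [hse, hg k (by simp) y (by simp [hgk, hy])]
      have hLall : ∀ y ∈ K'.flatMap grp, (pvVal y "series" == pvVal e "series") = false := by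
        intro y hy
        simp only [List.mem_flatMap] at hy
        obtain ⟨k', hk', hy'⟩ := hy
        have : pvVal y "series" = k' := hg' k' hk' y hy'
        simp [this, hse]
        intro h; exact hkK' (h ▸ hk')
      have htd := pv_take_drop_while (fun x => pvVal x "series" == pvVal e "series")
        g (K'.flatMap grp) hgall hLall
      simp only [List.cons_append, List.isEmpty_cons]
      rw [pvEmitRuns]
      simp only [htd.1, htd.2]
      rw [ih _ hK' hg']
      congr 1
      rw [hse]
      simp only [Bool.false_eq_true, if_false, String.append_assoc]
      rw [pv_foldl_append, String.append_assoc]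
      simp only [pvBlock, pvLink, String.append_assoc]

-- the filter predicate A uses, in terms of B's rank test (one statement per rank r < 7)
theorem pv_pred (s : String) (r : Nat) (hr : r < 7) :
    ((pvRank s == r) && pvKeys.contains s) = (s == pvKeys.getD r "") := by
  by_cases h : s ∈ pvKeys
  · simp only [pvKeys, List.mem_cons, List.not_mem_nil, or_false] at h
    rcases h with h|h|h|h|h|h|h <;> subst h <;> (interval_cases r <;> decide)
  · have hc : pvKeys.contains s = false := by simpa using h
    simp only [pvKeys, List.mem_cons, List.not_mem_nil, or_false, not_or] at h
    obtain ⟨h1,h2,h3,h4,h5,h6,h7⟩ := h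
    interval_cases r <;> simp [pvKeys, h1, h2, h3, h4, h5, h6, h7]

-- ===== VERDICT (by name: the statement is the Claim_ definition above) =====
theorem build_sidebar_spec : Claim_equal_build_sidebar := by
  intro entries cs _ _
  unfold Spec_build_sidebar
  simp only [build_sidebar, build_sidebar_alt]
  have hR : ([0,1,2,3,4,5,6] : List Nat).Pairwise (· < ·) := by decide
  have hall : ∀ e ∈ PySem.List.sorted (entries.filter (fun e => pvKeys.contains (pvVal e "series")))
      (fun e => pvVal e "file_id") false, pvRank (pvVal e "series") ∈ ([0,1,2,3,4,5,6] : List Nat) := by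
    intro e he
    rw [PySem.List.mem_sorted] at he
    have hs : pvVal e "series" ∈ pvKeys := by simpa using (List.mem_filter.mp he).2
    simp only [pvKeys, List.mem_cons, List.not_mem_nil, or_false] at hs
    rcases hs with h|h|h|h|h|h|h <;> rw [h] <;> decide
  rw [pv_sorted_buckets (fun e => pvRank (pvVal e "series")) [0,1,2,3,4,5,6] _ hR hall]
  have hbk : ∀ (r : Nat), r < 7 →
      (PySem.List.sorted (entries.filter (fun e => pvKeys.contains (pvVal e "series")))
        (fun e => pvVal e "file_id") false).filter (fun e => pvRank (pvVal e "series") == r)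
      = PySem.List.sorted (entries.filter (fun e => pvVal e "series" == pvKeys.getD r ""))
        (fun e => pvVal e "file_id") false := by
    intro r hr
    rw [pv_filter_sorted]
    congr 1
    rw [List.filter_filter]
    apply List.filter_congr
    intro e _
    exact pv_pred (pvVal e "series") r hr
  simp only [List.flatMap_cons, List.flatMap_nil, List.append_nil]
  rw [hbk 0 (by omega), hbk 1 (by omega), hbk 2 (by omega), hbk 3 (by omega),
      hbk 4 (by omega), hbk 5 (by omega), hbk 6 (by omega)]
  simp only [show pvKeys.getD 0 "" = "core" from rfl, show pvKeys.getD 1 "" = "ark" from rfl,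
    show pvKeys.getD 2 "" = "flk" from rfl, show pvKeys.getD 3 "" = "roar" from rfl,
    show pvKeys.getD 4 "" = "vex" from rfl, show pvKeys.getD 5 "" = "warp" from rfl,
    show pvKeys.getD 6 "" = "special" from rfl]
  have hflat : (pvKeys.flatMap (fun k =>
      PySem.List.sorted (entries.filter (fun e => pvVal e "series" == k))
        (fun e => pvVal e "file_id") false))
      = PySem.List.sorted (entries.filter (fun e => pvVal e "series" == "core"))
          (fun e => pvVal e "file_id") false ++
        (PySem.List.sorted (entries.filter (fun e => pvVal e "series" == "ark"))
          (fun e => pvVal e "file_id") false ++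
        (PySem.List.sorted (entries.filter (fun e => pvVal e "series" == "flk"))
          (fun e => pvVal e "file_id") false ++
        (PySem.List.sorted (entries.filter (fun e => pvVal e "series" == "roar"))
          (fun e => pvVal e "file_id") false ++
        (PySem.List.sorted (entries.filter (fun e => pvVal e "series" == "vex"))
          (fun e => pvVal e "file_id") false ++
        (PySem.List.sorted (entries.filter (fun e => pvVal e "series" == "warp"))
          (fun e => pvVal e "file_id") false ++
        PySem.List.sorted (entries.filter (fun e => pvVal e "series" == "special"))
          (fun e => pvVal e "file_id") false))))) := by
    simp only [pvKeys, List.flatMap_cons, List.flatMap_nil, List.append_nil]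
  rw [← hflat]
  rw [pv_runs cs pvKeys _ _ (by decide) (by
    intro k hk e he
    rw [PySem.List.mem_sorted] at he
    simpa using (List.mem_filter.mp he).2)]
  congr 1
  apply PySem.List.foldl_congr_mem
  intro acc k hk
  have hemp : (PySem.List.sorted (entries.filter (fun e => pvVal e "series" == k))
      (fun e => pvVal e "file_id") false).isEmpty
      = (entries.filter (fun e => pvVal e "series" == k)).isEmpty := by
    rw [Bool.eq_iff_iff]; simp [List.isEmpty_iff, PySem.List.sorted_eq_nil_iff]
  by_cases hg : (entries.filter (fun e => pvVal e "series" == k)).isEmpty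
  · simp [hg, hemp]
  · simp only [hg, hemp, Bool.false_eq_true, if_false]
    rw [show (entries.filter (fun e => pvVal e "series" == k)).length
        = (PySem.List.sorted (entries.filter (fun e => pvVal e "series" == k))
            (fun e => pvVal e "file_id") false).length from
          (PySem.List.length_sorted _ _ _).symm]
    simp only [String.append_assoc]
    rw [pv_foldl_append, String.append_assoc]
    simp only [pvBlock, pvLink, String.append_assoc]
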